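-- pv_equiv track=rewrite | github.com/zeroistfilm/algorithm100 | 센서가이상해.py | calcSwitch
-- ===== SOURCE A (Python) =====
-- def calcSwitch(first, selected):
--     result =0
--     firstlist= []
--     selectedlist = []
--     for i in first:
--         firstlist.append(i)
--     for i in selected:
--         selectedlist.append(i)
--
--     for i in range(len(firstlist)):
--         if firstlist[i] ==selectedlist[i]:
--             #순서대로 비교하면서 같으면 넘어가고
--             continue
--         else:#다를경우에 뒷부분을 살펴본다
--             for j in range(i,len(firstlist)):
--                 #뒷부분을 보면서 원본값에 해당하는 위치를 반환하고, 그게 이동한 횟수가된다다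
--                 if firstlist[i] == selectedlist[j]:
--                     selectedlist[i] ,selectedlist[j] =selectedlist[j], selectedlist[i]
--                     break
--                 result+=1
--     return  result
-- ===== SOURCE B (Python) =====
-- def calcSwitch(first, selected):
--     cur = selected[:len(first)]
--     result = 0
--     for v in first:
--         if v in cur:
--             j = cur.index(v)
--             if j == 0:
--                 cur = cur[1:]
--             else:
--                 result += j
--                 cur = cur[1:j] + cur[:1] + cur[j+1:]
--         else:
--             result += len(cur)
--             cur = cur[1:]
--     return result
-- ===== Notes on version B (the rewrite author's own statement) =====
-- stated objective: alternative
-- what changed: Replaces A's index-based in-place simulation (nested index loops over the full arrays with an explicit swap and a manual counting scan) by a single fold over the values of `first` carrying a shrinking immutable suffix window of `selected`, computing each step's cost as the window index of the sought value and rebuilding the window by slicing instead of swapping.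
import Mathlib
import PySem

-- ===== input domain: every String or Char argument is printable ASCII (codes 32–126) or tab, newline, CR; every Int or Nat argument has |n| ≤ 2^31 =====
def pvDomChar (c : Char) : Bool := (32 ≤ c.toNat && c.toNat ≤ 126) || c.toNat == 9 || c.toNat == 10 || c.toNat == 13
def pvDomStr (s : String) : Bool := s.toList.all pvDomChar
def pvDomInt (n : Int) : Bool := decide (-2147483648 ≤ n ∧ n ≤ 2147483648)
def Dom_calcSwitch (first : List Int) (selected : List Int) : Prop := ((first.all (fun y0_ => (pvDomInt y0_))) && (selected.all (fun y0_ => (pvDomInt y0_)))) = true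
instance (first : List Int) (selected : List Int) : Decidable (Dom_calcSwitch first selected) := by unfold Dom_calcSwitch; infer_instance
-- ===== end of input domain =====

-- B replaces A's nested index loops + in-place swap by a single fold over `first`
-- carrying a shrinking immutable window of `selected` (objective: alternative decomposition).

-- ===== PORT A =====
-- inner `for j in range(i, len(firstlist))` with break, mutating (result, selectedlist)
def calcSwitchInner (i : Int) (fi : Int) (js : List Int) (res : Int) (sel : List Int) :
    Int × List Int :=
  match js with
  | [] => (res, sel)
  | j :: rest =>
    if fi = PySem.List.pyGetD sel j 0 then
      -- selectedlist[i], selectedlist[j] = selectedlist[j], selectedlist[i]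
      let a := PySem.List.pyGetD sel j 0
      let b := PySem.List.pyGetD sel i 0
      (res, PySem.List.pySetD (PySem.List.pySetD sel i a) j b)
    else
      calcSwitchInner i fi rest (res + 1) sel

def calcSwitchStep (firstlist : List Int) (st : Int × List Int) (i : Int) : Int × List Int :=
  if PySem.List.pyGetD firstlist i 0 = PySem.List.pyGetD st.2 i 0 then st
  else calcSwitchInner i (PySem.List.pyGetD firstlist i 0)
        (PySem.List.pyRange i (firstlist.length : Int) 1) st.1 st.2

def calcSwitch (first : List Int) (selected : List Int) : Int :=
  let firstlist := first.foldl (fun acc x => acc ++ [x]) []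
  let selectedlist := selected.foldl (fun acc x => acc ++ [x]) []
  ((PySem.List.pyRange 0 (firstlist.length : Int) 1).foldl
      (calcSwitchStep firstlist) (0, selectedlist)).1

-- ===== PORT B =====
-- one step of B's loop: state (result, cur)
def calcSwitchAltStep (st : Int × List Int) (v : Int) : Int × List Int :=
  match PySem.List.index? st.2 v with
  | some j =>
    if j = 0 then (st.1, PySem.List.slice st.2 (some 1) none)
    else (st.1 + (j : Int),
      PySem.List.slice st.2 (some 1) (some (j : Int)) ++
      PySem.List.slice st.2 none (some 1) ++
      PySem.List.slice st.2 (some ((j : Int) + 1)) none)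
  | none => (st.1 + (st.2.length : Int), PySem.List.slice st.2 (some 1) none)

def calcSwitch_alt (first : List Int) (selected : List Int) : Int :=
  (first.foldl calcSwitchAltStep
    (0, PySem.List.slice selected none (some (first.length : Int)))).1

-- ===== PRECONDITION & SPEC =====
-- A indexes selectedlist at every position of first, so it raises IndexError
-- exactly when selected is shorter than first; those inputs are excluded.
def Pre_calcSwitch (first : List Int) (selected : List Int) : Prop :=
  first.length ≤ selected.length
instance (first : List Int) (selected : List Int) : Decidable (Pre_calcSwitch first selected) := by
  unfold Pre_calcSwitch; infer_instance

def pvWitness_calcSwitch : List Int × List Int := ([1, 2, 3], [3, 1, 2])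

def Spec_calcSwitch (first : List Int) (selected : List Int) (out : Int) : Prop :=
  out = calcSwitch_alt first selected
instance (first : List Int) (selected : List Int) (out : Int) : Decidable (Spec_calcSwitch first selected out) := by
  unfold Spec_calcSwitch; infer_instance

-- ===== CLAIM (what is proved, stated in full; the proofs are below) =====
def Claim_equal_calcSwitch : Prop :=
  ∀ (first : List Int) (selected : List Int), Dom_calcSwitch first selected →
    Pre_calcSwitch first selected → Spec_calcSwitch first selected (calcSwitch first selected)

-- ===== LEMMAS AND PROOFS =====

-- B's step adds a value to the accumulator and transforms the window independently of it
theorem altStep_decomp (r s : Int) (cur : List Int) (v : Int) :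
    calcSwitchAltStep (r + s, cur) v
      = (r + (calcSwitchAltStep (s, cur) v).1, (calcSwitchAltStep (s, cur) v).2) := by
  unfold calcSwitchAltStep
  cases h : PySem.List.index? cur v with
  | none => simp [add_assoc]
  | some j => by_cases hj : j = 0 <;> simp [hj, add_assoc]

-- hence B's whole fold is shift-invariant in the accumulator
theorem altFold_shift (fs : List Int) (r s : Int) (cur : List Int) :
    (fs.foldl calcSwitchAltStep (r + s, cur)).1
      = r + (fs.foldl calcSwitchAltStep (s, cur)).1 := by
  induction fs generalizing s cur with
  | nil => rfl
  | cons v fs ih =>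
    simp only [List.foldl_cons, altStep_decomp r s cur v]
    exact ih _ _

-- A's inner scan from j over the window (sel.drop j).take m: first match = index?,
-- cost = its index, swap positions i and j+t; no match = cost m, sel unchanged
theorem inner_spec (n : Nat) (v : Int) (i : Nat) :
    ∀ (m j : Nat) (res : Int) (sel : List Int), j + m = n → n ≤ sel.length →
    calcSwitchInner (i : Int) v (PySem.List.pyRange (j : Int) (n : Int) 1) res sel
      = match PySem.List.index? ((sel.drop j).take m) v with
        | some t => (res + (t : Int),
            (sel.set i (sel.getD (j + t) 0)).set (j + t) (sel.getD i 0))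
        | none => (res + (m : Int), sel) := by
  intro m
  induction m with
  | zero =>
    intro j res sel hjm hn
    have hj : (j : Int) = (n : Int) := by omega
    rw [hj, PySem.List.pyRange_one_eq_nil le_rfl]
    simp [calcSwitchInner, PySem.List.index?_eq_idxOf?]
  | succ m ih =>
    intro j res sel hjm hn
    have hjn : (j : Int) < (n : Int) := by exact_mod_cast (by omega : j < n)
    have hjlen : j < sel.length := by omega
    rw [PySem.List.pyRange_one_cons hjn]
    have hwin : (sel.drop j).take (m + 1) = sel[j] :: ((sel.drop (j + 1)).take m) := by
      rw [List.drop_eq_getElem_cons hjlen]; rfl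
    unfold calcSwitchInner
    simp only [PySem.List.pyGetD_natCast]
    by_cases hv : v = sel.getD j 0
    · have hvj : v = sel[j] := by rwa [List.getD_eq_getElem sel 0 hjlen] at hv
      rw [if_pos hv, hwin, ← hvj, PySem.List.index?_cons_self v]
      simp [PySem.List.pySetD_natCast]
    · rw [if_neg hv]
      have h1 : ((j : Int) + 1) = ((j + 1 : Nat) : Int) := by push_cast; ring
      rw [h1, ih (j + 1) (res + 1) sel (by omega) hn]
      have hne : sel[j] ≠ v := by
        intro h; exact hv (by rw [List.getD_eq_getElem sel 0 hjlen, h])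
      rw [hwin, PySem.List.index?_cons_of_ne _ hne]
      cases ht : PySem.List.index? ((sel.drop (j + 1)).take m) v with
      | none => simp; ring
      | some t =>
        simp only [Option.map_some]
        have e1 : j + 1 + t = j + (t + 1) := by omega
        have e2 : res + 1 + (t : Int) = res + ((t + 1 : Nat) : Int) := by push_cast; ring
        rw [e1, e2]

-- the window of the swapped array at i+1 is B's rebuilt window
theorem window_swap (sel : List Int) (i t n : Nat)
    (ht : 1 ≤ t) (hin : i + t < n) (hn : n ≤ sel.length) :
    (((sel.set i (sel.getD (i + t) 0)).set (i + t) (sel.getD i 0)).drop (i + 1)).take (n - (i + 1))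
      = ((((sel.drop i).take (n - i)).drop 1).take (t - 1))
        ++ ((sel.drop i).take (n - i)).take 1
        ++ ((sel.drop i).take (n - i)).drop (t + 1) := by
  have hilen : i < sel.length := by omega
  have hcur : ((sel.drop i).take (n - i)).length = n - i := by
    simp [List.length_take, List.length_drop]; omega
  apply List.ext_getElem
  · simp [List.length_take, List.length_drop, List.length_append, List.length_set, hcur]
    omega
  · intro q hq1 hq2
    have hq : q < n - (i + 1) := by
      simp [List.length_take, List.length_drop, List.length_set] at hq1; omega
    have hL : (((((sel.set i (sel.getD (i + t) 0)).set (i + t) (sel.getD i 0)).drop (i + 1)).take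
        (n - (i + 1))))[q] = if i + 1 + q = i + t then sel.getD i 0 else sel[i + 1 + q]'(by omega) := by
      rw [List.getElem_take, List.getElem_drop, List.getElem_set, List.getElem_set]
      have hne : ¬ i = i + 1 + q := by omega
      simp only [hne, if_false]
      by_cases hc : i + t = i + 1 + q
      · rw [if_pos hc, if_pos hc.symm]
      · rw [if_neg hc, if_neg (fun h => hc h.symm)]
    rw [hL]
    simp only [List.getElem_append, List.getElem_take, List.getElem_drop,
      List.length_take, List.length_drop, List.length_append, hcur]
    split_ifs with hA hB hC <;>
      simp only [hcur] at * <;>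
      first
        | (congr 1; omega)
        | (rw [List.getD_eq_getElem sel 0 hilen]; congr 1; omega)

-- main loop invariant: A's outer fold from i equals res + B's fold over first.drop i
-- on the window (sel.drop i).take m, where i + m = first.length ≤ sel.length
theorem loop_spec (first : List Int) :
    ∀ (m i : Nat) (res : Int) (sel : List Int),
    i + m = first.length → first.length ≤ sel.length →
    ((PySem.List.pyRange (i : Int) (first.length : Int) 1).foldl
        (calcSwitchStep first) (res, sel)).1
      = res + ((first.drop i).foldl calcSwitchAltStep (0, (sel.drop i).take m)).1 := by
  intro m
  induction m with
  | zero =>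
    intro i res sel him hn
    have hi : (i : Int) = (first.length : Int) := by omega
    rw [hi, PySem.List.pyRange_one_eq_nil le_rfl]
    have : first.drop i = [] := by
      apply List.drop_eq_nil_of_le; omega
    simp [this]
  | succ m ih =>
    intro i res sel him hn
    have hif : i < first.length := by omega
    have hisel : i < sel.length := by omega
    have hin : (i : Int) < (first.length : Int) := by exact_mod_cast hif
    rw [PySem.List.pyRange_one_cons hin]
    rw [List.foldl_cons]
    have hdropf : first.drop i = first[i] :: first.drop (i + 1) :=
      List.drop_eq_getElem_cons hif
    have hwin : (sel.drop i).take (m + 1) = sel[i] :: ((sel.drop (i + 1)).take m) := by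
      rw [List.drop_eq_getElem_cons hisel]; rfl
    have hgf : PySem.List.pyGetD first (i : Int) 0 = first[i] := by
      rw [PySem.List.pyGetD_natCast, List.getD_eq_getElem first 0 hif]
    have hgs : PySem.List.pyGetD sel (i : Int) 0 = sel[i] := by
      rw [PySem.List.pyGetD_natCast, List.getD_eq_getElem sel 0 hisel]
    rw [hdropf, hwin, List.foldl_cons]
    by_cases heq : first[i] = sel[i]
    · have happ : calcSwitchStep first (res, sel) (i : Int) = (res, sel) := by
        unfold calcSwitchStep
        simp only [hgf, hgs, heq, if_true]
      rw [happ]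
      have hstep : calcSwitchAltStep (0, sel[i] :: (sel.drop (i + 1)).take m) first[i]
          = (0, (sel.drop (i + 1)).take m) := by
        unfold calcSwitchAltStep
        rw [show sel[i] = first[i] from heq.symm, PySem.List.index?_cons_self first[i]]
        simp [PySem.List.slice_from_one]
      rw [hstep]
      have h1 : ((i : Int) + 1) = ((i + 1 : Nat) : Int) := by push_cast; ring
      rw [h1, ih (i + 1) res sel (by omega) hn]
    · have happ : calcSwitchStep first (res, sel) (i : Int)
          = calcSwitchInner i first[i] (PySem.List.pyRange (i : Int) (first.length : Int) 1)
              res sel := by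
        unfold calcSwitchStep
        simp only [hgf, hgs, heq, if_false]
      rw [happ]
      have hne : sel[i] ≠ first[i] := fun h => heq h.symm
      have hspec := inner_spec first.length first[i] i (m + 1) i res sel him hn
      rw [hwin] at hspec
      have hcons := PySem.List.index?_cons_of_ne ((sel.drop (i + 1)).take m) hne
      have hstepB : ∀ st, calcSwitchAltStep st first[i]
          = match PySem.List.index? st.2 first[i] with
            | some j => if j = 0 then (st.1, PySem.List.slice st.2 (some 1) none)
                else (st.1 + (j : Int),
                  PySem.List.slice st.2 (some 1) (some (j : Int)) ++
                  PySem.List.slice st.2 none (some 1) ++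
                  PySem.List.slice st.2 (some ((j : Int) + 1)) none)
            | none => (st.1 + (st.2.length : Int), PySem.List.slice st.2 (some 1) none) := by
        intro st; rfl
      have hwlen : (sel[i] :: (sel.drop (i + 1)).take m).length = m + 1 := by
        simp [List.length_take, List.length_drop]; omega
      cases hw : PySem.List.index? ((sel.drop (i + 1)).take m) first[i] with
      | none =>
        rw [hw, Option.map_none] at hcons
        rw [hcons] at hspec
        have hspec2 : calcSwitchInner (i : Int) first[i]
            (PySem.List.pyRange (i : Int) (first.length : Int) 1) res sel
            = (res + ((m + 1 : Nat) : Int), sel) := hspec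
        rw [hspec2]
        have h1 : ((i : Int) + 1) = ((i + 1 : Nat) : Int) := by push_cast; ring
        rw [h1, ih (i + 1) (res + ((m + 1 : Nat) : Int)) sel (by omega) hn]
        rw [hstepB, hcons]
        simp only [hwlen, PySem.List.slice_from_one, List.tail_cons]
        rw [show (0 : Int) + ((m + 1 : Nat) : Int) = ((m + 1 : Nat) : Int) + 0 from by ring,
            altFold_shift (first.drop (i + 1)) ((m + 1 : Nat) : Int) 0
              ((sel.drop (i + 1)).take m)]
        ring
      | some t' =>
        rw [hw, Option.map_some] at hcons
        rw [hcons] at hspec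
        have hspec2 : calcSwitchInner (i : Int) first[i]
            (PySem.List.pyRange (i : Int) (first.length : Int) 1) res sel
            = (res + ((t' + 1 : Nat) : Int),
               (sel.set i (sel.getD (i + (t' + 1)) 0)).set (i + (t' + 1)) (sel.getD i 0)) := hspec
        rw [hspec2]
        -- bound on t'
        obtain ⟨pre, suf, hdecomp, hlenpre, -⟩ :=
          (PySem.List.index?_eq_some_iff _ _ _).mp hw
        have hwl : ((sel.drop (i + 1)).take m).length ≤ m := by
          simp [List.length_take]
        have ht' : t' < m := by
          have : ((sel.drop (i + 1)).take m).length = pre.length + (suf.length + 1) := by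
            rw [hdecomp]; simp
          omega
        set sel' := (sel.set i (sel.getD (i + (t' + 1)) 0)).set (i + (t' + 1)) (sel.getD i 0)
          with hsel'
        have hlen' : sel'.length = sel.length := by simp [hsel', List.length_set]
        have h1 : ((i : Int) + 1) = ((i + 1 : Nat) : Int) := by push_cast; ring
        rw [h1, ih (i + 1) (res + ((t' + 1 : Nat) : Int)) sel' (by omega) (by omega)]
        rw [hstepB, hcons]
        simp only [show ¬ (t' + 1 = 0) from by omega, if_false]
        -- identify B's rebuilt window with the swapped window via window_swap
        have hws := window_swap sel i (t' + 1) first.length (by omega) (by omega) hn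
        have hslices :
            PySem.List.slice (sel[i] :: (sel.drop (i + 1)).take m) (some 1)
                (some ((t' + 1 : Nat) : Int)) ++
              PySem.List.slice (sel[i] :: (sel.drop (i + 1)).take m) none (some 1) ++
              PySem.List.slice (sel[i] :: (sel.drop (i + 1)).take m)
                (some (((t' + 1 : Nat) : Int) + 1)) none
            = ((((sel.drop i).take (first.length - i)).drop 1).take (t' + 1 - 1))
              ++ ((sel.drop i).take (first.length - i)).take 1
              ++ ((sel.drop i).take (first.length - i)).drop (t' + 1 + 1) := by
          have hw1 : (sel.drop i).take (first.length - i)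
              = sel[i] :: (sel.drop (i + 1)).take m := by
            rw [show first.length - i = m + 1 from by omega]; exact hwin
          rw [hw1]
          rw [PySem.List.slice_toNat _ (by omega) (by omega),
              PySem.List.slice_to _ (by omega),
              PySem.List.slice_from _ (by omega)]
          norm_num
          rw [show ((t' : Int) + 1 + 1).toNat = t' + 1 + 1 from by omega, List.drop_succ_cons]
        rw [hslices, ← hws]
        have hwin' : (sel'.drop (i + 1)).take m
            = (sel'.drop (i + 1)).take (first.length - (i + 1)) := by
          rw [show first.length - (i + 1) = m from by omega]
        rw [← hwin']
        rw [show (0 : Int) + ((t' + 1 : Nat) : Int) = ((t' + 1 : Nat) : Int) + 0 from by ring,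
            altFold_shift (first.drop (i + 1)) ((t' + 1 : Nat) : Int) 0
              ((sel'.drop (i + 1)).take m)]
        ring

-- ===== VERDICT (by name: the statement is the Claim_ definition above) =====
theorem calcSwitch_spec : Claim_equal_calcSwitch := by
  intro first selected _ hpre
  unfold Spec_calcSwitch calcSwitch calcSwitch_alt
  simp only []
  have hf : first.foldl (fun acc x => acc ++ [x]) [] = first := by
    simpa using PySem.List.foldl_append_singleton first []
  have hs : selected.foldl (fun acc x => acc ++ [x]) [] = selected := by
    simpa using PySem.List.foldl_append_singleton selected []
  rw [hf, hs]
  have h := loop_spec first first.length 0 0 selected (by omega) hpre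
  simp only [Nat.cast_zero, List.drop_zero, zero_add] at h
  rw [h, PySem.List.slice_to_natCast]
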